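-- pv_equiv track=rewrite | github.com/CZ-NIC/respdiff | respdiff/diffsum.py | combine_stats
-- ===== SOURCE A (Python) =====
-- import collections
--
-- def combine_stats(counters):
--     field_mismatch_sums = {}
--     for field in counters:
--         field_mismatch_sums[field] = collections.Counter(
--             {mismatch: sum(counter.values())
--              for mismatch, counter in counters[field].items()})
--
--     field_sums = collections.Counter(
--         {field: sum(counter.values())
--          for field, counter in field_mismatch_sums.items()})
--     return field_sums, field_mismatch_sums
-- ===== SOURCE B (Python) =====
-- import collections
--
-- def combine_stats(counters):
--     def conquer(items):
--         if not items:
--             return {}, {}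
--         if len(items) == 1:
--             (field, ms), = items
--             per = collections.Counter(
--                 {mismatch: sum(counter.values()) for mismatch, counter in ms.items()})
--             total = sum(v for counter in ms.values() for v in counter.values())
--             return {field: total}, {field: per}
--         mid = len(items) // 2
--         lsums, lfms = conquer(items[:mid])
--         rsums, rfms = conquer(items[mid:])
--         return {**lsums, **rsums}, {**lfms, **rfms}
--
--     sums, field_mismatch_sums = conquer(list(counters.items()))
--     return collections.Counter(sums), field_mismatch_sums
-- ===== Notes on version B (the rewrite author's own statement) =====
-- stated objective: alternative
-- what changed: Divide-and-conquer recursion: the field list is split in half, each half aggregated recursively and the two halves' dicts merged, with each field's total computed directly by flattening the raw innermost counter values instead of re-summing the per-mismatch sums aggregated in the first stage.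
import Mathlib
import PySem

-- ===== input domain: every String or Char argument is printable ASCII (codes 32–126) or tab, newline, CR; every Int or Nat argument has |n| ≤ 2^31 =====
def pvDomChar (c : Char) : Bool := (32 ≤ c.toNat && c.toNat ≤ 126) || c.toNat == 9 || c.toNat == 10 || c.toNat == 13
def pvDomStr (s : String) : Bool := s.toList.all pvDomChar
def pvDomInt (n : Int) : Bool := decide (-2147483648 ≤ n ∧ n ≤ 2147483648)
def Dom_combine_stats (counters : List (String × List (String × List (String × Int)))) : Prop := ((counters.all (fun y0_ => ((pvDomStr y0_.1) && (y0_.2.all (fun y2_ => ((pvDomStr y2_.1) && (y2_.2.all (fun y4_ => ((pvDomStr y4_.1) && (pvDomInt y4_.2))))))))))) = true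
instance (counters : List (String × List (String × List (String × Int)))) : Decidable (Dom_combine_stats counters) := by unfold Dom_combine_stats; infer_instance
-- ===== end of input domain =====

-- ===== PORT A =====
-- B replaces A's two staged linear passes by a divide-and-conquer recursion whose field
-- totals come from the flattened raw values; equivalence is about the return value.
-- sum(xs) for a list of ints
def pySum (xs : List Int) : Int := xs.foldl (· + ·) 0

-- A: first build field_mismatch_sums by a dict-insert loop over the fields (fresh keys append),
-- then a second pass re-scans it to build field_sums.
def combine_stats (counters : List (String × List (String × List (String × Int)))) : (List (String × Int)) × (List (String × List (String × Int))) :=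
  let field_mismatch_sums :=
    counters.foldl
      (fun acc p =>
        acc ++ [(p.1, p.2.map (fun q => (q.1, pySum (q.2.map (·.2)))))])
      []
  let field_sums := field_mismatch_sums.map (fun p => (p.1, pySum (p.2.map (·.2))))
  (field_sums, field_mismatch_sums)

-- ===== PORT B =====
-- B's divide-and-conquer: split the field list in half, recurse, merge the halves' dicts
-- ({**l, **r} = append, exact under Pre_'s no-duplicate-keys).  In the singleton case the
-- field total sums the flattened raw innermost values.
def conquer : List (String × List (String × List (String × Int))) → (List (String × Int)) × (List (String × List (String × Int)))
  | [] => ([], [])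
  | [(field, ms)] =>
      let per := ms.map (fun q => (q.1, pySum (q.2.map (·.2))))
      let total := pySum ((ms.map (fun q => q.2.map (·.2))).flatten)
      ([(field, total)], [(field, per)])
  | a :: b :: rest =>
      let items := a :: b :: rest
      let mid := items.length / 2
      let l := conquer (items.take mid)
      let r := conquer (items.drop mid)
      (l.1 ++ r.1, l.2 ++ r.2)
termination_by items => items.length
decreasing_by
  · simp [List.length_take]; omega
  · simp [List.length_drop]; omega

def combine_stats_alt (counters : List (String × List (String × List (String × Int)))) : (List (String × Int)) × (List (String × List (String × Int))) :=
  let r := conquer counters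
  (r.1, r.2)

-- ===== PRECONDITION & SPEC =====
-- Pre_ excludes association lists with duplicate keys at some nesting level: a real Python dict
-- cannot hold them, so which entry survives there is an accident of the list-to-dict collapse.
def Pre_combine_stats (counters : List (String × List (String × List (String × Int)))) : Prop :=
  (counters.map (·.1)).Nodup ∧
  ∀ p ∈ counters, (p.2.map (·.1)).Nodup ∧ ∀ q ∈ p.2, (q.2.map (·.1)).Nodup
instance (counters : List (String × List (String × List (String × Int)))) : Decidable (Pre_combine_stats counters) := by unfold Pre_combine_stats; infer_instance

def pvWitness_combine_stats : (List (String × List (String × List (String × Int)))) :=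
  [("rcode", [("timeout", [("x", 1), ("y", 2)]), ("noerror", [])]), ("flags", [])]

def Spec_combine_stats (counters : List (String × List (String × List (String × Int)))) (out : (List (String × Int)) × (List (String × List (String × Int)))) : Prop := out = combine_stats_alt counters
instance (counters : List (String × List (String × List (String × Int)))) (out : (List (String × Int)) × (List (String × List (String × Int)))) : Decidable (Spec_combine_stats counters out) := by unfold Spec_combine_stats; infer_instance

-- ===== CLAIM (what is proved, stated in full; the proofs are below) =====
def Claim_equal_combine_stats : Prop := ∀ (counters : List (String × List (String × List (String × Int)))), Dom_combine_stats counters → Pre_combine_stats counters → Spec_combine_stats counters (combine_stats counters)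

-- ===== LEMMAS AND PROOFS =====

-- a foldl that only appends one element per step is a map
theorem foldl_append_map {α β : Type} (f : α → β) (l : List α) (acc : List β) :
    l.foldl (fun a p => a ++ [f p]) acc = acc ++ l.map f := by
  induction l generalizing acc with
  | nil => simp
  | cons x xs ih => simp [List.foldl_cons, ih]

theorem pySum_foldl (l : List Int) (b : Int) : l.foldl (· + ·) b = b + pySum l := by
  induction l generalizing b with
  | nil => simp [pySum]
  | cons y ys ihy =>
    simp only [pySum, List.foldl_cons] at *
    rw [ihy, ihy (0 + y)]; ring

theorem pySum_append (a b : List Int) : pySum (a ++ b) = pySum a + pySum b := by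
  simp only [pySum, List.foldl_append]
  rw [pySum_foldl b (a.foldl (· + ·) 0)]
  rfl

-- summing the flattened raw values equals summing the per-group sums
theorem pySum_flatten (l : List (List Int)) : pySum l.flatten = pySum (l.map pySum) := by
  induction l with
  | nil => rfl
  | cons x xs ih =>
    simp only [List.flatten_cons, List.map_cons, pySum_append, ih]
    show pySum x + pySum (xs.map pySum) = pySum (pySum x :: xs.map pySum)
    rw [show pySum x :: xs.map pySum = [pySum x] ++ xs.map pySum from rfl, pySum_append]
    simp [pySum]

-- B's divide-and-conquer computes, field by field, A's per-field counter and total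
theorem conquer_eq (items : List (String × List (String × List (String × Int)))) :
    conquer items =
      (items.map (fun p => (p.1, pySum (p.2.map (fun q => pySum (q.2.map (·.2)))))),
       items.map (fun p => (p.1, p.2.map (fun q => (q.1, pySum (q.2.map (·.2))))))) := by
  induction items using conquer.induct with
  | case1 => simp [conquer]
  | case2 field ms =>
    simp only [conquer, List.map_cons, List.map_nil]
    rw [pySum_flatten]
    simp [List.map_map, Function.comp_def]
  | case3 a b rest x1 x2 ih1 ih2 =>
    rw [conquer, ih1, ih2, Prod.mk.injEq]
    constructor <;> rw [← List.map_append, List.take_append_drop]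

-- ===== VERDICT (by name: the statement is the Claim_ definition above) =====
theorem combine_stats_spec : Claim_equal_combine_stats := by
  intro counters _ _
  unfold Spec_combine_stats combine_stats combine_stats_alt
  rw [foldl_append_map, conquer_eq]
  simp [List.map_map, Function.comp_def]
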